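-- pv_equiv track=rewrite | github.com/zhiyunl/lcSolution | oa.py | find_range_query_frequencies
-- ===== SOURCE A (Python) =====
-- from collections import deque, defaultdict
-- import bisect
--
-- def find_range_query_frequencies(nums, queries):
--     dd = defaultdict(list)
--     ans = 0
--     for i, num in enumerate(nums):
--         dd[num].append(i) # key: num;  value: indexes where nums[index] = num
--     for query in queries:
--         left, right, k = query
--         if k not in dd:
--             continue
--         i, j = bisect.bisect_left(dd[k], left), bisect.bisect_right(dd[k], right)
--         frequency = j - i
--         ans += frequency
--     return ans
-- ===== SOURCE B (Python) =====
-- def find_range_query_frequencies(nums, queries):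
--     ans = 0
--     for left, right, k in queries:
--         for i, num in enumerate(nums):
--             if left <= i <= right and num == k:
--                 ans += 1
--     return ans
-- ===== Notes on version B (the rewrite author's own statement) =====
-- stated objective: simpler
-- what changed: Drops the precomputed value->indices dictionary and the bisect binary searches; each query is answered by a direct scan of enumerate(nums) counting indices i with left <= i <= right and nums[i] == k.
-- intended difference: On inputs containing a query (left,right,k) with right < left and some index i with nums[i] == k strictly between right and left, A adds the negative bisect difference (so it returns an under-count, possibly negative), while B counts the empty index range as 0 matches, the intended frequency. — e.g. on find_range_query_frequencies([0], [(5, -1, 0)]): A returns -1, B returns 0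
import Mathlib
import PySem

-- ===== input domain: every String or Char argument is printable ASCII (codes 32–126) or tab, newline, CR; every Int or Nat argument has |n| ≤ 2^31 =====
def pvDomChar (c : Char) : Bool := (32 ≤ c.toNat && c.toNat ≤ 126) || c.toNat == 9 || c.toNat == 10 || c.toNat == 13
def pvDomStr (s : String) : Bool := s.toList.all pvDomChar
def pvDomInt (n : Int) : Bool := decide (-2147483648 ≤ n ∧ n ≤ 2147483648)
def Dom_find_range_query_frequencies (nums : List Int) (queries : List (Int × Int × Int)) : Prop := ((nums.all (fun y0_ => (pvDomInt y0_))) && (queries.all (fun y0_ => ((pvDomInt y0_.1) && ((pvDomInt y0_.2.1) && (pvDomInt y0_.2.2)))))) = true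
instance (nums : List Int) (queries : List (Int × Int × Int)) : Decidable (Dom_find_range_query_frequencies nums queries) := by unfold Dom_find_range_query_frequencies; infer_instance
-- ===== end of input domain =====

-- B drops A's precomputed value→indices dict + bisect and answers each query by a direct counting
-- scan of enumerate(nums) (simpler); A and B differ exactly on the D_ inputs described below.


-- ===== PORT A =====
-- dd[num].append(i) on a defaultdict(list) is Dict.modify num [] (· ++ [i]);
-- 'if k not in dd: continue' is the contains test, so dd[k] afterwards is getD k [].
def find_range_query_frequencies (nums : List Int) (queries : List (Int × Int × Int)) : Int :=
  let dd : PySem.Dict Int (List Int) :=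
    (PySem.List.enumerate nums).foldl
      (fun d p => d.modify p.2 [] (fun l => l ++ [p.1])) PySem.Dict.empty
  queries.foldl (fun ans q =>
    if dd.contains q.2.2 then
      let i := PySem.List.bisectLeft (dd.getD q.2.2 []) q.1
      let j := PySem.List.bisectRight (dd.getD q.2.2 []) q.2.1
      let frequency : Int := (j : Int) - (i : Int)
      ans + frequency
    else ans) 0

-- ===== PORT B =====
def find_range_query_frequencies_alt (nums : List Int) (queries : List (Int × Int × Int)) : Int :=
  queries.foldl (fun ans q =>
    (PySem.List.enumerate nums).foldl
      (fun a p => if q.1 ≤ p.1 ∧ p.1 ≤ q.2.1 ∧ p.2 = q.2.2 then a + 1 else a) ans) 0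

-- ===== PRECONDITION & SPEC =====
-- On inputs containing a query (left,right,k) with right < left and some index i with nums[i] = k
-- strictly between right and left, A adds the negative bisect difference (an under-count, possibly
-- negative overall), while B counts the empty index range as 0 matches, the intended frequency.
def D_find_range_query_frequencies (nums : List Int) (queries : List (Int × Int × Int)) : Prop :=
  ∃ q ∈ queries, ∃ p ∈ PySem.List.enumerate nums, q.2.1 < p.1 ∧ p.1 < q.1 ∧ p.2 = q.2.2
instance (nums : List Int) (queries : List (Int × Int × Int)) : Decidable (D_find_range_query_frequencies nums queries) := by unfold D_find_range_query_frequencies; infer_instance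

def Spec_find_range_query_frequencies (nums : List Int) (queries : List (Int × Int × Int)) (out : Int) : Prop := ¬ D_find_range_query_frequencies nums queries → out = find_range_query_frequencies_alt nums queries
instance (nums : List Int) (queries : List (Int × Int × Int)) (out : Int) : Decidable (Spec_find_range_query_frequencies nums queries out) := by unfold Spec_find_range_query_frequencies; infer_instance

def pvDiffWitness_find_range_query_frequencies : List Int × (List (Int × Int × Int)) := ([0], [(5, -1, 0)])
def pvDiffWitnessOut_find_range_query_frequencies : Int × Int := (-1, 0)

-- ===== CLAIM (what is proved, stated in full; the proofs are below) =====
def Claim_unchanged_find_range_query_frequencies : Prop := ∀ (nums : List Int) (queries : List (Int × Int × Int)), Dom_find_range_query_frequencies nums queries → Spec_find_range_query_frequencies nums queries (find_range_query_frequencies nums queries)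
def Claim_changed_find_range_query_frequencies : Prop := Dom_find_range_query_frequencies (pvDiffWitness_find_range_query_frequencies.1) (pvDiffWitness_find_range_query_frequencies.2) ∧ D_find_range_query_frequencies (pvDiffWitness_find_range_query_frequencies.1) (pvDiffWitness_find_range_query_frequencies.2) ∧ find_range_query_frequencies (pvDiffWitness_find_range_query_frequencies.1) (pvDiffWitness_find_range_query_frequencies.2) = pvDiffWitnessOut_find_range_query_frequencies.1 ∧ find_range_query_frequencies_alt (pvDiffWitness_find_range_query_frequencies.1) (pvDiffWitness_find_range_query_frequencies.2) = pvDiffWitnessOut_find_range_query_frequencies.2 ∧ pvDiffWitnessOut_find_range_query_frequencies.1 ≠ pvDiffWitnessOut_find_range_query_frequencies.2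
def Claim_exact_find_range_query_frequencies : Prop := ∀ (nums : List Int) (queries : List (Int × Int × Int)), Dom_find_range_query_frequencies nums queries → D_find_range_query_frequencies nums queries → find_range_query_frequencies nums queries ≠ find_range_query_frequencies_alt nums queries

-- ===== LEMMAS AND PROOFS =====

-- idx nums k = the (increasing) list of indices i with nums[i] = k, as A's dict stores it.
def pvIdx (nums : List Int) (k : Int) : List Int :=
  ((PySem.List.enumerate nums).filter (fun p => p.2 == k)).map (fun p => p.1)

-- the (nonnegative) amount by which A under-counts query q
def pvCorr (nums : List Int) (q : Int × Int × Int) : Int :=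
  ((pvIdx nums q.2.2).countP (fun i => decide (q.2.1 < i) && decide (i < q.1)) : Int)

-- B's per-query contribution
def pvCnt (nums : List Int) (q : Int × Int × Int) : Int :=
  ((PySem.List.enumerate nums).countP
    (fun p => decide (q.1 ≤ p.1) && (decide (p.1 ≤ q.2.1) && decide (p.2 = q.2.2))) : Int)

lemma pvDict_getD (nums : List Int) (k : Int) :
    (((PySem.List.enumerate nums).foldl
        (fun d p => d.modify p.2 [] (fun l => l ++ [p.1])) PySem.Dict.empty).getD k [])
      = pvIdx nums k := by
  have h := PySem.Dict.getD_foldl_modify_append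
      ((PySem.List.enumerate nums).map Prod.swap)
      (PySem.Dict.empty : PySem.Dict Int (List Int)) k
  rw [List.foldl_map] at h
  simpa [pvIdx, List.filter_map, Function.comp] using h

lemma pvDict_contains (nums : List Int) (k : Int) :
    (((PySem.List.enumerate nums).foldl
        (fun d p => d.modify p.2 [] (fun l => l ++ [p.1])) PySem.Dict.empty).contains k) = true
      ↔ k ∈ nums := by
  rw [PySem.Dict.contains_iff_mem_keys,
      PySem.Dict.keys_foldl_modify_key (PySem.List.enumerate nums) (fun p => p.2) []
        (fun d x => fun l => l ++ [x.1]) PySem.Dict.empty]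
  simp [PySem.Dict.keys_empty, PySem.List.map_snd_enumerate, PySem.Set.update_nil_left,
        PySem.Set.mem_ofList]

lemma pvIdx_sorted (nums : List Int) (k : Int) : (pvIdx nums k).Pairwise (· ≤ ·) := by
  unfold pvIdx
  rw [List.pairwise_map]
  exact ((PySem.List.pairwise_lt_enumerate nums 0).filter _).imp (fun h => le_of_lt h)

lemma pvCountP_eq_of_split {p : Int → Bool} {xs : List Int} (n : Nat)
    (hn : n ≤ xs.length)
    (h1 : ∀ j (hj : j < xs.length), j < n → p xs[j])
    (h2 : ∀ j (hj : j < xs.length), n ≤ j → p xs[j] = false) :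
    xs.countP p = n := by
  have hx : xs = xs.take n ++ xs.drop n := (List.take_append_drop n xs).symm
  rw [hx, List.countP_append]
  have ht : (xs.take n).countP p = (xs.take n).length := by
    rw [List.countP_eq_length]
    intro a ha
    obtain ⟨j, hj, hja⟩ := List.getElem_of_mem ha
    have hjn : j < n := by simp at hj; omega
    rw [← hja, List.getElem_take]
    exact h1 j (by omega) hjn
  have hd : (xs.drop n).countP p = 0 := by
    rw [List.countP_eq_zero]
    intro a ha
    obtain ⟨j, hj, hja⟩ := List.getElem_of_mem ha
    rw [← hja, List.getElem_drop]
    simp [h2 (n + j) (by simp at hj; omega) (by omega)]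
  rw [ht, hd, List.length_take]
  omega

lemma pvBisectLeft_eq (xs : List Int) (x : Int) (hs : xs.Pairwise (· ≤ ·)) :
    PySem.List.bisectLeft xs x = xs.countP (fun a => decide (a < x)) := by
  obtain ⟨hle, hlt, hge⟩ := PySem.List.bisectLeft_spec xs x hs
  exact (pvCountP_eq_of_split _ hle
    (fun j hj hjn => by simpa using hlt j hj hjn)
    (fun j hj hjn => by simpa using not_lt.mpr (hge j hj hjn))).symm

lemma pvBisectRight_eq (xs : List Int) (x : Int) (hs : xs.Pairwise (· ≤ ·)) :
    PySem.List.bisectRight xs x = xs.countP (fun a => decide (a ≤ x)) := by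
  obtain ⟨hle, hlt, hge⟩ := PySem.List.bisectRight_spec xs x hs
  exact (pvCountP_eq_of_split _ hle
    (fun j hj hjn => by simpa using hlt j hj hjn)
    (fun j hj hjn => by simpa using not_le.mpr (hge j hj hjn))).symm

-- pointwise counting identity on any Int list
lemma pvCount_identity (xs : List Int) (l r : Int) :
    xs.countP (fun a => decide (a ≤ r)) + xs.countP (fun a => decide (r < a) && decide (a < l))
      = xs.countP (fun a => decide (a < l))
        + xs.countP (fun a => decide (l ≤ a) && decide (a ≤ r)) := by
  induction xs with
  | nil => simp
  | cons x xs ih =>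
      simp only [List.countP_cons]
      by_cases h1 : x ≤ r <;> by_cases h2 : x < l <;> by_cases h3 : l ≤ x <;>
        by_cases h4 : r < x <;> simp [h1, h2, h3, h4] <;> omega

-- B's inner count restricted through pvIdx
lemma pvCnt_eq_idx (nums : List Int) (q : Int × Int × Int) :
    pvCnt nums q = ((pvIdx nums q.2.2).countP
      (fun i => decide (q.1 ≤ i) && decide (i ≤ q.2.1)) : Int) := by
  unfold pvCnt pvIdx
  rw [List.countP_map, List.countP_filter]
  congr 1
  apply List.countP_congr
  intro p _
  by_cases h1 : q.1 ≤ p.1 <;> by_cases h2 : p.1 ≤ q.2.1 <;> by_cases h3 : p.2 = q.2.2 <;>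
    simp [h1, h2, h3, Function.comp]

-- per-query value of A
lemma pvA_query (nums : List Int) (q : Int × Int × Int) :
    (if (((PySem.List.enumerate nums).foldl
            (fun d p => d.modify p.2 [] (fun l => l ++ [p.1])) PySem.Dict.empty).contains q.2.2)
      then
        ((PySem.List.bisectRight
            ((((PySem.List.enumerate nums).foldl
                (fun d p => d.modify p.2 [] (fun l => l ++ [p.1])) PySem.Dict.empty).getD q.2.2 []))
            q.2.1 : Int)
          - (PySem.List.bisectLeft
            ((((PySem.List.enumerate nums).foldl
                (fun d p => d.modify p.2 [] (fun l => l ++ [p.1])) PySem.Dict.empty).getD q.2.2 []))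
            q.1 : Int))
      else 0)
      = pvCnt nums q - pvCorr nums q := by
  rw [pvDict_getD]
  by_cases hc : (((PySem.List.enumerate nums).foldl
      (fun d p => d.modify p.2 [] (fun l => l ++ [p.1])) PySem.Dict.empty).contains q.2.2) = true
  · rw [if_pos hc, pvBisectLeft_eq _ _ (pvIdx_sorted nums q.2.2),
        pvBisectRight_eq _ _ (pvIdx_sorted nums q.2.2), pvCnt_eq_idx]
    unfold pvCorr
    have := pvCount_identity (pvIdx nums q.2.2) q.1 q.2.1
    omega
  · rw [if_neg hc]
    have hk : q.2.2 ∉ nums := fun h => hc ((pvDict_contains nums q.2.2).mpr h)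
    have hidx : pvIdx nums q.2.2 = [] := by
      unfold pvIdx
      rw [List.map_eq_nil_iff, List.filter_eq_nil_iff]
      intro p hp hb
      exact hk (by
        have h2 : p.2 = q.2.2 := by simpa using hb
        have : p.2 ∈ nums := by
          rw [← PySem.List.map_snd_enumerate nums 0]
          exact List.mem_map_of_mem hp
        rwa [h2] at this)
    rw [pvCnt_eq_idx]
    unfold pvCorr
    rw [hidx]
    simp

-- the two folds as sums
lemma pvA_sum (nums : List Int) (queries : List (Int × Int × Int)) :
    find_range_query_frequencies nums queries
      = (queries.map (fun q => pvCnt nums q - pvCorr nums q)).sum := by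
  unfold find_range_query_frequencies
  have hstep : (fun (ans : Int) (q : Int × Int × Int) =>
      if (((PySem.List.enumerate nums).foldl
            (fun d p => d.modify p.2 [] (fun l => l ++ [p.1])) PySem.Dict.empty).contains q.2.2)
        then
          let i := PySem.List.bisectLeft
            ((((PySem.List.enumerate nums).foldl
                (fun d p => d.modify p.2 [] (fun l => l ++ [p.1])) PySem.Dict.empty).getD q.2.2 []))
            q.1
          let j := PySem.List.bisectRight
            ((((PySem.List.enumerate nums).foldl
                (fun d p => d.modify p.2 [] (fun l => l ++ [p.1])) PySem.Dict.empty).getD q.2.2 []))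
            q.2.1
          let frequency : Int := (j : Int) - (i : Int)
          ans + frequency
        else ans)
      = fun ans q => ans + (pvCnt nums q - pvCorr nums q) := by
    funext ans q
    rw [← pvA_query nums q]
    split_ifs <;> simp
  simp only [hstep]
  rw [PySem.List.foldl_add]
  simp

lemma pvB_sum (nums : List Int) (queries : List (Int × Int × Int)) :
    find_range_query_frequencies_alt nums queries = (queries.map (fun q => pvCnt nums q)).sum := by
  unfold find_range_query_frequencies_alt
  have hstep : (fun (ans : Int) (q : Int × Int × Int) =>
      (PySem.List.enumerate nums).foldl
        (fun a p => if q.1 ≤ p.1 ∧ p.1 ≤ q.2.1 ∧ p.2 = q.2.2 then a + 1 else a) ans)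
      = fun ans q => ans + pvCnt nums q := by
    funext ans q
    rw [PySem.List.foldl_ite_add_one]
    unfold pvCnt
    congr 2
    apply List.countP_congr
    intro p _
    by_cases h1 : q.1 ≤ p.1 <;> by_cases h2 : p.1 ≤ q.2.1 <;> by_cases h3 : p.2 = q.2.2 <;>
      simp [h1, h2, h3]
  simp only [hstep]
  rw [PySem.List.foldl_add]
  simp

-- A = B − total correction
lemma pvAB (nums : List Int) (queries : List (Int × Int × Int)) :
    find_range_query_frequencies nums queries
      = find_range_query_frequencies_alt nums queries
        - (queries.map (fun q => pvCorr nums q)).sum := by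
  rw [pvA_sum, pvB_sum]
  induction queries with
  | nil => simp
  | cons q qs ih => simp only [List.map_cons, List.sum_cons, ih]; ring

lemma pvCorr_pos_iff (nums : List Int) (q : Int × Int × Int) :
    0 < pvCorr nums q
      ↔ ∃ p ∈ PySem.List.enumerate nums, q.2.1 < p.1 ∧ p.1 < q.1 ∧ p.2 = q.2.2 := by
  unfold pvCorr pvIdx
  rw [Int.natCast_pos, List.countP_pos_iff]
  constructor
  · rintro ⟨i, hi, hp⟩
    obtain ⟨p, hp2, rfl⟩ := List.mem_map.mp hi
    obtain ⟨hpe, hpk⟩ := List.mem_filter.mp hp2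
    simp only [Bool.and_eq_true, decide_eq_true_eq] at hp
    exact ⟨p, hpe, hp.1, hp.2, by simpa using hpk⟩
  · rintro ⟨p, hpe, h1, h2, h3⟩
    exact ⟨p.1, List.mem_map_of_mem (List.mem_filter.mpr ⟨hpe, by simp [h3]⟩), by simp [h1, h2]⟩

-- ===== VERDICT (by name: the statement is the Claim_ definition above) =====
theorem find_range_query_frequencies_spec : Claim_unchanged_find_range_query_frequencies := by
  intro nums queries _ hnd
  rw [pvAB]
  have hz : (queries.map (fun q => pvCorr nums q)).sum = 0 := by
    apply List.sum_eq_zero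
    intro x hx
    obtain ⟨q, hq, rfl⟩ := List.mem_map.mp hx
    by_contra hne
    have hpos : 0 < pvCorr nums q := by
      unfold pvCorr at *
      omega
    exact hnd ⟨q, hq, (pvCorr_pos_iff nums q).mp hpos⟩
  rw [hz]
  ring

theorem find_range_query_frequencies_changed : Claim_changed_find_range_query_frequencies := by
  unfold Claim_changed_find_range_query_frequencies; decide

theorem find_range_query_frequencies_tight : Claim_exact_find_range_query_frequencies := by
  intro nums queries _ hd heq
  rw [pvAB] at heq
  have hsum : (queries.map (fun q => pvCorr nums q)).sum = 0 := by omega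
  obtain ⟨q, hq, hp⟩ := hd
  have hpos : 0 < pvCorr nums q := (pvCorr_pos_iff nums q).mpr hp
  have hle : pvCorr nums q ≤ (queries.map (fun q => pvCorr nums q)).sum := by
    apply List.single_le_sum
    · intro x hx
      obtain ⟨q', _, rfl⟩ := List.mem_map.mp hx
      unfold pvCorr
      positivity
    · exact List.mem_map_of_mem hq
  omega
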